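-- pv_equiv track=rewrite | github.com/SarthakSwaroop/Office-Hours-320 | OH Scheduling Algorithm/schedule_generator.py | find_common_times
-- ===== SOURCE A (Python) =====
-- from collections import Counter
--
-- def find_common_times(availability, rankings, n, ranking_weight=1):
--     all_times = []
--     for student_time in availability:
--         all_times.extend(student_time)
--
--     # hash the frequency of each time
--     time_counts = Counter(all_times)
--
--     # return the n most popular times
--     common_times = [time for time, count in time_counts.most_common(n)]
--
--     # sort common_times by cumulative ranking
--     common_times_rankings = {}
--     for time in common_times:
--         common_times_rankings[time] = time_counts[time]
--         for student_rankings in rankings: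
--             if time in student_rankings:
--                 common_times_rankings[time] += ((3 - student_rankings.index(time))*ranking_weight)
--     sorted_common_times = sorted(common_times, key=lambda x: common_times_rankings[x], reverse=True)
--
--     return sorted_common_times[:n], time_counts # return the n most popular times with at least m students attending, and the frequency of all times as a Counter object
-- ===== SOURCE B (Python) =====
-- def find_common_times(availability, rankings, n, ranking_weight=1):
--     # count every time in one pass (insertion order = first occurrence)
--     time_counts = {}
--     for student_time in availability:
--         for time in student_time:
--             time_counts[time] = time_counts.get(time, 0) + 1
--
--     if n <= 0:
--         return [], time_counts
--
--     # one pass over all rankings: cumulative bonus per time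
--     # (a time counts once per student, at its first position in that student's list)
--     bonus = {}
--     for student_rankings in rankings:
--         seen = set()
--         for i, time in enumerate(student_rankings):
--             if time not in seen:
--                 seen.add(time)
--                 bonus[time] = bonus.get(time, 0) + (3 - i) * ranking_weight
--
--     top = sorted(time_counts.items(), key=lambda kv: kv[1], reverse=True)[:n]
--     common_times = [time for time, _ in top]
--     scored = sorted(common_times,
--                     key=lambda t: time_counts[t] + bonus.get(t, 0),
--                     reverse=True)
--     return scored, time_counts
-- ===== Notes on version B (the rewrite author's own statement) =====
-- stated objective: faster
-- what changed: Instead of scanning every student's ranking list (membership test plus .index) once per common time, B makes a single pass over all rankings building a time-to-bonus dict and counts availability directly into a dict without materialising the flattened list, so each score is an O(1) lookup.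
import Mathlib
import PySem

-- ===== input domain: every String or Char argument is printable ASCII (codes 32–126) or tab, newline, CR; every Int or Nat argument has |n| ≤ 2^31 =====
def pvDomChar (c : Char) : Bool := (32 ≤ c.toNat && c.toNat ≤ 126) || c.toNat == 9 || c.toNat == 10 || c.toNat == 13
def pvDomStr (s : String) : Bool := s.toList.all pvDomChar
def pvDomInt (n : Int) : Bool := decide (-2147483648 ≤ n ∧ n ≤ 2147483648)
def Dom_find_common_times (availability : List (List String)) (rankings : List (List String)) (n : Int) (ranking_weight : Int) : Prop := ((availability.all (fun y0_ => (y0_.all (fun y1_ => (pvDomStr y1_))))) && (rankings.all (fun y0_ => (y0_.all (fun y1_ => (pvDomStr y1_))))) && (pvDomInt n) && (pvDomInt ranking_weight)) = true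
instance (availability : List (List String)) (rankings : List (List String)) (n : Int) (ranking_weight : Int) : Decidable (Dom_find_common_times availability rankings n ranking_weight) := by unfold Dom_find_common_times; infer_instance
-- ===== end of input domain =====

-- B replaces A's per-common-time scan of all rankings (membership test + .index per student) by one
-- pass over the rankings building a time→bonus dict; objective: faster (asymptotic).
-- Python's Counter return value is ported as its items association list (insertion order).

-- ===== PORT A =====

-- student_rankings.index(time): first index; A only evaluates it under `time in student_rankings`,
-- so the `.getD 0` default is never taken and the port is exact.
def pvIdx (sr : List String) (t : String) : Int := (((PySem.List.index? sr t).getD 0 : Nat) : Int)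

-- Counter.most_common(n): items sorted by count descending (stable), first n; n < 0 gives [].
def pvMostCommon (d : PySem.Dict String Int) (n : Int) : List (String × Int) :=
  if n < 0 then [] else (PySem.List.sorted d.items (fun kv => kv.2) true).take n.toNat

def find_common_times (availability : List (List String)) (rankings : List (List String)) (n : Int) (ranking_weight : Int) : List String × (List (String × Int)) :=
  let all_times := availability.foldl (fun acc student_time => acc ++ student_time) []
  let time_counts := PySem.Dict.counter all_times
  let common_times := (pvMostCommon time_counts n).map (·.1)
  -- time_counts[time] and common_times_rankings[x]: the key is always present, so getD _ 0 is exact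
  let common_times_rankings := common_times.foldl (fun d time =>
      rankings.foldl (fun d' student_rankings =>
          if time ∈ student_rankings then
            d'.insert time (d'.getD time 0 + (3 - pvIdx student_rankings time) * ranking_weight)
          else d')
        (d.insert time (time_counts.getD time 0))) PySem.Dict.empty
  let sorted_common_times := PySem.List.sorted common_times (fun x => common_times_rankings.getD x 0) true
  (PySem.List.slice sorted_common_times none (some n), time_counts.items)

-- ===== PORT B =====

-- B's inner loop: `for i, time in enumerate(student_rankings): if time not in seen: …`
def pvAddStudent (w : Int) : PySem.Dict String Int → PySem.Set String → Int → List String → PySem.Dict String Int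
  | d, _, _, [] => d
  | d, seen, i, t :: rest =>
    if t ∈ seen then pvAddStudent w d seen (i + 1) rest
    else pvAddStudent w (d.insert t (d.getD t 0 + (3 - i) * w)) (PySem.Set.add seen t) (i + 1) rest

def find_common_times_alt (availability : List (List String)) (rankings : List (List String)) (n : Int) (ranking_weight : Int) : List String × (List (String × Int)) :=
  let time_counts := availability.foldl (fun d student_time =>
      student_time.foldl (fun d' t => d'.insert t (d'.getD t 0 + 1)) d) PySem.Dict.empty
  if n ≤ 0 then ([], time_counts.items)
  else
    let bonus := rankings.foldl (fun d student_rankings =>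
        pvAddStudent ranking_weight d PySem.Set.empty 0 student_rankings) PySem.Dict.empty
    let top := PySem.List.slice (PySem.List.sorted time_counts.items (fun kv => kv.2) true) none (some n)
    let common_times := top.map (·.1)
    let scored := PySem.List.sorted common_times
        (fun t => time_counts.getD t 0 + bonus.getD t 0) true
    (scored, time_counts.items)

-- ===== PRECONDITION & SPEC =====
def Spec_find_common_times (availability : List (List String)) (rankings : List (List String)) (n : Int) (ranking_weight : Int) (out : List String × (List (String × Int))) : Prop := out = find_common_times_alt availability rankings n ranking_weight
instance (availability : List (List String)) (rankings : List (List String)) (n : Int) (ranking_weight : Int) (out : List String × (List (String × Int))) : Decidable (Spec_find_common_times availability rankings n ranking_weight out) := by unfold Spec_find_common_times; infer_instance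

-- ===== CLAIM (what is proved, stated in full; the proofs are below) =====
def Claim_equal_find_common_times : Prop := ∀ (availability : List (List String)) (rankings : List (List String)) (n : Int) (ranking_weight : Int), Dom_find_common_times availability rankings n ranking_weight → Spec_find_common_times availability rankings n ranking_weight (find_common_times availability rankings n ranking_weight)

-- ===== LEMMAS AND PROOFS =====

-- the two counting loops build the same dict
lemma counts_eq (av : List (List String)) :
    av.foldl (fun d student_time => student_time.foldl (fun d' t => d'.insert t (d'.getD t 0 + 1)) d) PySem.Dict.empty
    = PySem.Dict.counter (av.foldl (fun acc student_time => acc ++ student_time) []) := by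
  have h1 : av.foldl (fun acc student_time => acc ++ student_time) [] = av.flatten := by
    have := PySem.List.foldl_append_eq_flatMap (fun l : List String => l) av []
    simpa [List.flatMap_id'] using this
  rw [h1, ← PySem.Dict.foldl_insert_getD_add_one_eq_counter, List.foldl_flatten]

-- A's inner loop over rankings only rewrites the key `t`
lemma rank_fold_insert (w : Int) (t : String) :
    ∀ (rk : List (List String)) (d : PySem.Dict String Int) (base : Int),
    rk.foldl (fun d' sr => if t ∈ sr then d'.insert t (d'.getD t 0 + (3 - pvIdx sr t) * w) else d')
        (d.insert t base)
    = d.insert t (rk.foldl (fun acc sr => if t ∈ sr then acc + (3 - pvIdx sr t) * w else acc) base) := by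
  intro rk
  induction rk with
  | nil => intro d base; rfl
  | cons sr rest ih =>
    intro d base
    by_cases h : t ∈ sr
    · simp only [List.foldl_cons, h, if_pos, PySem.Dict.getD_insert_self,
        PySem.Dict.insert_insert_self, ih]
    · simp only [List.foldl_cons, h, ih, if_false]

-- lookup in a dict built by inserting f t for each t
lemma getD_foldl_insert_fun (f : String → Int) :
    ∀ (l : List String) (d : PySem.Dict String Int) (x : String),
    (l.foldl (fun d t => d.insert t (f t)) d).getD x 0 = if x ∈ l then f x else d.getD x 0 := by
  intro l
  induction l with
  | nil => intro d x; simp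
  | cons t rest ih =>
    intro d x
    by_cases hxt : x = t
    · subst hxt
      by_cases hmem : x ∈ rest <;>
        simp [List.foldl_cons, ih, hmem, PySem.Dict.getD_insert_self]
    · simp [List.foldl_cons, ih, hxt, PySem.Dict.getD_insert_of_ne _ _ _ hxt]

lemma pvIdx_cons_self (x : String) (rest : List String) : pvIdx (x :: rest) x = 0 := by
  simp only [pvIdx, PySem.List.index?_cons_self, Option.getD_some, Nat.cast_zero]

lemma pvIdx_cons_of_ne (t x : String) (rest : List String) (hne : t ≠ x) (hmem : x ∈ rest) :
    pvIdx (t :: rest) x = pvIdx rest x + 1 := by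
  unfold pvIdx
  rw [PySem.List.index?_cons_of_ne rest hne]
  obtain ⟨j, hj⟩ := Option.isSome_iff_exists.1 ((PySem.List.index?_isSome_iff rest x).2 hmem)
  rw [hj]
  simp only [Option.map_some, Option.getD_some]
  push_cast
  ring

-- B\'s per-student pass: effect on one key
lemma getD_addStudent (w : Int) (x : String) :
    ∀ (sr : List String) (d : PySem.Dict String Int) (seen : PySem.Set String) (i : Int),
    (pvAddStudent w d seen i sr).getD x 0
    = d.getD x 0 + (if x ∈ sr ∧ x ∉ seen then (3 - (i + pvIdx sr x)) * w else 0) := by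
  intro sr
  induction sr with
  | nil => intro d seen i; simp [pvAddStudent]
  | cons t rest ih =>
    intro d seen i
    by_cases hseen : t ∈ seen
    · rw [pvAddStudent, if_pos hseen, ih]
      by_cases hxt : x = t
      · subst hxt; simp [hseen]
      · by_cases hmem : x ∈ rest
        · simp only [hxt, hmem, pvIdx_cons_of_ne t x rest (fun h => hxt h.symm) hmem,
            List.mem_cons, or_true, true_and]
          split_ifs <;> ring
        · simp [hxt, hmem]
    · rw [pvAddStudent, if_neg hseen, ih]
      by_cases hxt : x = t
      · subst hxt
        simp [hseen, PySem.Dict.getD_insert_self, pvIdx_cons_self]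

      · have hadd : (x ∈ PySem.Set.add seen t) ↔ x ∈ seen := by
          rw [PySem.Set.mem_add]
          exact ⟨fun h => h.elim id (fun h => absurd h hxt), Or.inl⟩
        rw [PySem.Dict.getD_insert_of_ne _ _ _ hxt]
        by_cases hmem : x ∈ rest
        · simp only [hxt, hmem, hadd, pvIdx_cons_of_ne t x rest (fun h => hxt h.symm) hmem,
            List.mem_cons, or_true, true_and]
          split_ifs <;> ring
        · simp [hxt, hmem, hadd]

-- B's whole bonus loop: lookup = sum of per-student contributions
lemma getD_bonus (w : Int) (x : String) :
    ∀ (rk : List (List String)) (d : PySem.Dict String Int),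
    (rk.foldl (fun d sr => pvAddStudent w d PySem.Set.empty 0 sr) d).getD x 0
    = d.getD x 0 + (rk.map (fun sr => if x ∈ sr then (3 - pvIdx sr x) * w else 0)).sum := by
  intro rk
  induction rk with
  | nil => intro d; simp
  | cons sr rest ih =>
    intro d
    have hempty : x ∉ (PySem.Set.empty : PySem.Set String) := by
      simp [PySem.Set.empty]
    rw [List.foldl_cons, ih, getD_addStudent, List.map_cons, List.sum_cons]
    simp only [hempty, not_false_iff, and_true, zero_add]
    ring

-- A's accumulator loop as the same sum
lemma score_fold_eq_sum (w : Int) (x : String) (rk : List (List String)) (base : Int) :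
    rk.foldl (fun acc sr => if x ∈ sr then acc + (3 - pvIdx sr x) * w else acc) base
    = base + (rk.map (fun sr => if x ∈ sr then (3 - pvIdx sr x) * w else 0)).sum := by
  have h : (fun (acc : Int) (sr : List String) => if x ∈ sr then acc + (3 - pvIdx sr x) * w else acc)
      = fun acc sr => acc + (if x ∈ sr then (3 - pvIdx sr x) * w else 0) := by
    funext acc sr; split <;> simp
  rw [h, PySem.List.foldl_add]

-- sorted with reverse=True only looks at the key values of the list's elements
lemma insertBy_key_congr (k1 k2 : String → Int) (x : String) :
    ∀ (ys : List String), (∀ y ∈ ys, k1 y = k2 y) → k1 x = k2 x →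
    PySem.List.insertBy (fun a b => decide (k1 b < k1 a)) x ys
    = PySem.List.insertBy (fun a b => decide (k2 b < k2 a)) x ys := by
  intro ys
  induction ys with
  | nil => intro _ _; rfl
  | cons y ys ih =>
    intro h hx
    have hy : k1 y = k2 y := h y List.mem_cons_self
    simp only [PySem.List.insertBy, hy, hx]
    split <;> simp_all [ih (fun z hz => h z (List.mem_cons_of_mem _ hz)) hx]

lemma sorted_rev_key_congr (k1 k2 : String → Int) :
    ∀ (xs acc : List String), (∀ a ∈ acc, k1 a = k2 a) → (∀ a ∈ xs, k1 a = k2 a) →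
    xs.foldl (fun acc x => PySem.List.insertBy (fun a b => decide (k1 b < k1 a)) x acc) acc
    = xs.foldl (fun acc x => PySem.List.insertBy (fun a b => decide (k2 b < k2 a)) x acc) acc := by
  intro xs
  induction xs with
  | nil => intro acc _ _; rfl
  | cons x xs ih =>
    intro acc hacc hxs
    have hx : k1 x = k2 x := hxs x List.mem_cons_self
    simp only [List.foldl_cons, insertBy_key_congr k1 k2 x acc hacc hx]
    exact ih _ (fun a ha => by
        rcases (PySem.List.mem_insertBy _ x a acc).1 ha with h | h
        · exact h ▸ hx
        · exact hacc a h)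
      (fun a ha => hxs a (List.mem_cons_of_mem _ ha))

lemma sorted_rev_congr (xs : List String) (k1 k2 : String → Int)
    (h : ∀ x ∈ xs, k1 x = k2 x) :
    PySem.List.sorted xs k1 true = PySem.List.sorted xs k2 true := by
  rw [PySem.List.sorted_rev_eq_foldl_insertBy, PySem.List.sorted_rev_eq_foldl_insertBy]
  exact sorted_rev_key_congr k1 k2 xs [] (by simp) h

-- ===== VERDICT (by name: the statement is the Claim_ definition above) =====
theorem find_common_times_spec : Claim_equal_find_common_times := by
  intro av rk n w _
  unfold Spec_find_common_times
  simp only [find_common_times, find_common_times_alt]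
  rw [counts_eq]
  by_cases hn : n ≤ 0
  · rw [if_pos hn]
    have hmc : pvMostCommon (PySem.Dict.counter (av.foldl (fun acc st => acc ++ st) [])) n = [] := by
      unfold pvMostCommon
      by_cases h : n < 0
      · rw [if_pos h]
      · rw [if_neg h]
        have h0 : n.toNat = 0 := by omega
        simp [h0]
    rw [hmc]
    simp only [List.map_nil, List.foldl_nil]
    rw [(PySem.List.sorted_eq_nil_iff _ _ _).2 rfl]
    simp [PySem.List.slice]
  · rw [if_neg hn]
    have h0 : (0:Int) ≤ n := by omega
    have hmc : pvMostCommon (PySem.Dict.counter (av.foldl (fun acc st => acc ++ st) [])) n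
        = (PySem.List.sorted (PySem.Dict.counter (av.foldl (fun acc st => acc ++ st) [])).items
            (fun kv => kv.2) true).take n.toNat := by
      unfold pvMostCommon
      rw [if_neg (by omega)]
    rw [hmc, PySem.List.slice_to _ h0]
    simp only [rank_fold_insert]
    rw [sorted_rev_congr _ _
        (fun t => (PySem.Dict.counter (av.foldl (fun acc st => acc ++ st) [])).getD t 0
          + (rk.foldl (fun d sr => pvAddStudent w d PySem.Set.empty 0 sr) PySem.Dict.empty).getD t 0)
        (by
          intro x hx
          rw [getD_foldl_insert_fun
              (fun t => rk.foldl (fun acc sr => if t ∈ sr then acc + (3 - pvIdx sr t) * w else acc)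
                ((PySem.Dict.counter (av.foldl (fun acc st => acc ++ st) [])).getD t 0)),
            if_pos hx, score_fold_eq_sum]
          simp only []
          rw [getD_bonus w x rk PySem.Dict.empty]
          simp)]
    rw [List.take_of_length_le (by
      rw [PySem.List.length_sorted, List.length_map]
      exact List.length_take_le _ _)]
    rw [PySem.List.slice_to _ h0]
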